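-- pv_equiv track=rewrite | github.com/khaclinh2503/CTPPrototype | ctp/core/board.py | get_row_non_corner_positions
-- ===== SOURCE A (Python) =====
-- def get_row_non_corner_positions(water_tile_pos: int) -> list[int]:
--     """Lấy các ô không phải góc trong cùng hàng với water_tile_pos.
--
--     Bàn cờ 32 ô chia 4 hàng: [1-9], [9-17], [17-25], [25-1] (9 là góc).
--     Góc: 1, 9, 17, 25. Không phải ô WaterSlide.
--
--     Args:
--         water_tile_pos: Vị trí ô Water Slide.
--
--     Returns:
--         List of valid tile positions in the same row.
--     """
--     corners = {1, 9, 17, 25}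
--     # Xác định hàng chứa water_tile_pos
--     rows = [
--         list(range(1, 10)),   # hàng 0: 1-9
--         list(range(9, 18)),   # hàng 1: 9-17
--         list(range(17, 26)),  # hàng 2: 17-25
--         list(range(25, 33)) + [1],  # hàng 3: 25-32, 1
--     ]
--     my_row = None
--     for row in rows:
--         if water_tile_pos in row:
--             my_row = row
--             break
--     if my_row is None:
--         return []
--     return [
--         p for p in my_row
--         if p not in corners and p != water_tile_pos
--     ]
-- ===== SOURCE B (Python) =====
-- def get_row_non_corner_positions(water_tile_pos: int) -> list[int]:
--     if 1 <= water_tile_pos <= 9: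
--         seg = list(range(2, 9))
--     elif 10 <= water_tile_pos <= 17:
--         seg = list(range(10, 17))
--     elif 18 <= water_tile_pos <= 25:
--         seg = list(range(18, 25))
--     elif 26 <= water_tile_pos <= 32:
--         seg = list(range(26, 33))
--     else:
--         return []
--     return [p for p in seg if p != water_tile_pos]
-- ===== Notes on version B (the rewrite author's own statement) =====
-- stated objective: simpler
-- what changed: Replaces the four explicit row lists, the corners set and the membership-search loop with a direct range classification of the position into its non-corner segment, then removes the position itself by a comprehension.
import Mathlib
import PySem

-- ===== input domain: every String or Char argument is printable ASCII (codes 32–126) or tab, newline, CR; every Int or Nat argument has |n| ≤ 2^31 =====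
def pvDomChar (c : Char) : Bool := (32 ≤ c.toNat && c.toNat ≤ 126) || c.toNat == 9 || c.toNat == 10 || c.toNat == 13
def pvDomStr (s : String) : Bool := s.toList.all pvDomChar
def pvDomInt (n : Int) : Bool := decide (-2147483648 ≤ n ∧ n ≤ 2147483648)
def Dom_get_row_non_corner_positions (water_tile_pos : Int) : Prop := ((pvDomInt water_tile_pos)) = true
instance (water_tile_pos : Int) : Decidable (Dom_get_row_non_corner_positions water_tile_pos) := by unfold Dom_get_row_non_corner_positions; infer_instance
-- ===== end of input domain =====

-- B replaces A's four explicit row lists, corners set and membership-search loop with a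
-- direct range classification into the non-corner segment (objective: simpler).

-- ===== PORT A =====
def get_row_non_corner_positions (water_tile_pos : Int) : List Int :=
  let corners : List Int := [1, 9, 17, 25]
  let rows : List (List Int) :=
    [ PySem.List.pyRange 1 10 1,
      PySem.List.pyRange 9 18 1,
      PySem.List.pyRange 17 26 1,
      PySem.List.pyRange 25 33 1 ++ [1] ]
  match rows.find? (fun row => row.contains water_tile_pos) with
  | none => []
  | some my_row => my_row.filter (fun p => !corners.contains p && p != water_tile_pos)

-- ===== PORT B =====
def get_row_non_corner_positions_alt (water_tile_pos : Int) : List Int :=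
  if 1 ≤ water_tile_pos ∧ water_tile_pos ≤ 9 then
    (PySem.List.pyRange 2 9 1).filter (fun p => p != water_tile_pos)
  else if 10 ≤ water_tile_pos ∧ water_tile_pos ≤ 17 then
    (PySem.List.pyRange 10 17 1).filter (fun p => p != water_tile_pos)
  else if 18 ≤ water_tile_pos ∧ water_tile_pos ≤ 25 then
    (PySem.List.pyRange 18 25 1).filter (fun p => p != water_tile_pos)
  else if 26 ≤ water_tile_pos ∧ water_tile_pos ≤ 32 then
    (PySem.List.pyRange 26 33 1).filter (fun p => p != water_tile_pos)
  else []

-- ===== PRECONDITION & SPEC =====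
def Spec_get_row_non_corner_positions (water_tile_pos : Int) (out : List Int) : Prop := out = get_row_non_corner_positions_alt water_tile_pos
instance (water_tile_pos : Int) (out : List Int) : Decidable (Spec_get_row_non_corner_positions water_tile_pos out) := by unfold Spec_get_row_non_corner_positions; infer_instance

-- ===== CLAIM (what is proved, stated in full; the proofs are below) =====
def Claim_equal_get_row_non_corner_positions : Prop := ∀ (water_tile_pos : Int), Dom_get_row_non_corner_positions water_tile_pos → Spec_get_row_non_corner_positions water_tile_pos (get_row_non_corner_positions water_tile_pos)

-- ===== LEMMAS AND PROOFS =====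

-- ===== VERDICT (by name: the statement is the Claim_ definition above) =====
theorem get_row_non_corner_positions_spec : Claim_equal_get_row_non_corner_positions := by
  intro p _
  unfold Spec_get_row_non_corner_positions
  by_cases h : 1 ≤ p ∧ p ≤ 32
  · obtain ⟨h1, h2⟩ := h
    interval_cases p <;> decide
  · have h1 : ¬ (1 ≤ p ∧ p ≤ 9) := by omega
    have h2 : ¬ (10 ≤ p ∧ p ≤ 17) := by omega
    have h3 : ¬ (18 ≤ p ∧ p ≤ 25) := by omega
    have h4 : ¬ (26 ≤ p ∧ p ≤ 32) := by omega
    have hA : get_row_non_corner_positions p = [] := by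
      unfold get_row_non_corner_positions
      have hfind :
          List.find? (fun row => row.contains p)
            [PySem.List.pyRange 1 10 1, PySem.List.pyRange 9 18 1, PySem.List.pyRange 17 26 1,
              PySem.List.pyRange 25 33 1 ++ [1]] = none := by
        rw [List.find?_eq_none]
        rintro row hrow
        fin_cases hrow <;> simp [PySem.List.mem_pyRange_one] <;> omega
      simp only [hfind]
    rw [hA]
    unfold get_row_non_corner_positions_alt
    simp [h1, h2, h3, h4]
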